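-- pv_equiv track=rewrite | github.com/kenami0981/Antyplagiat | Antyplagiat/reporter.py | highlight_final_text
-- ===== SOURCE A (Python) =====
-- def find_fragments_and_sources(segments):
--     if not segments:
--         return []
--
--     segments_sorted = sorted(segments, key=lambda x: x[0])
--
--     merged = [segments_sorted[0]]
--
--     for (start, end), src in segments_sorted[1:]:
--         (last_start, last_end), last_src = merged[-1]
--
--         if start <= last_end:
--             merged[-1] = ((last_start, max(last_end, end)), last_src)
--         else:
--             merged.append(((start, end), src))
--
--     return merged
--
-- def highlight_final_text(final_text, segments_with_sources):
--     words = final_text.split()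
--     merged = find_fragments_and_sources(segments_with_sources)
--
--     output = []
--     bibliography = []
--     pointer = 0
--     idx = 1
--
--     for (start, end), src in merged:
--         output.append(" ".join(words[pointer:start]))
--
--         fragment = " ".join(words[start:end])
--         output.append(f"<font backColor='#FFF2A8'>{fragment}</font>[{idx}]")
--
--         bibliography.append((idx, src))
--         pointer = end
--         idx += 1
--
--     output.append(" ".join(words[pointer:]))
--
--     return " ".join(output), bibliography
-- ===== SOURCE B (Python) =====
-- def highlight_final_text(final_text, segments_with_sources):
--     # Single streaming pass over the sorted segments: merge and emit in one loop,
--     # never materialising a merged list.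
--     words = final_text.split()
--     output = []
--     bibliography = []
--     pointer = 0
--     idx = 1
--     segs = sorted(segments_with_sources, key=lambda x: x[0])
--     if segs:
--         (gs, ge), gsrc = segs[0]
--         for (start, end), src in segs[1:]:
--             if start <= ge:
--                 ge = max(ge, end)
--             else:
--                 output.append(" ".join(words[pointer:gs]))
--                 frag = " ".join(words[gs:ge])
--                 output.append(f"<font backColor='#FFF2A8'>{frag}</font>[{idx}]")
--                 bibliography.append((idx, gsrc))
--                 pointer = ge
--                 idx += 1
--                 gs, ge, gsrc = start, end, src
--         output.append(" ".join(words[pointer:gs]))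
--         frag = " ".join(words[gs:ge])
--         output.append(f"<font backColor='#FFF2A8'>{frag}</font>[{idx}]")
--         bibliography.append((idx, gsrc))
--         pointer = ge
--     output.append(" ".join(words[pointer:]))
--     return " ".join(output), bibliography
-- ===== Notes on version B (the rewrite author's own statement) =====
-- stated objective: simpler
-- what changed: B replaces A's two-phase merge-then-emit (build a full merged list with merged[-1] updates, then a second loop over it) with a single streaming pass over the sorted segments that keeps only the current group (start, running end, first source) and flushes it to output/bibliography when a gap appears.
import Mathlib
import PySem

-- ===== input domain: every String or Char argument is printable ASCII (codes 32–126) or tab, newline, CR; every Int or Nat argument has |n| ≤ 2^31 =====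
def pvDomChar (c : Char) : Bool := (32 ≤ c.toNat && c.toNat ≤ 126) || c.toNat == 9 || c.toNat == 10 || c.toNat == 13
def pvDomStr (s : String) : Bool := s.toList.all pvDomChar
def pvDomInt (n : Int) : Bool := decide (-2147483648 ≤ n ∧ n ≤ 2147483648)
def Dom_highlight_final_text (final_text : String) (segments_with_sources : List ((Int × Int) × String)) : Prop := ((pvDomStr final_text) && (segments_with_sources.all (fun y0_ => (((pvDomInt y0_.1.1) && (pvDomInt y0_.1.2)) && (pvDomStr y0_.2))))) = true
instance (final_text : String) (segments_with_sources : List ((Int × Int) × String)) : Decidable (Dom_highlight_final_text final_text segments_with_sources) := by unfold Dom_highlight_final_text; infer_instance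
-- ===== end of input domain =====

-- B replaces A's two-phase merge-then-emit with one streaming pass over the sorted
-- segments that merges and emits groups on the fly (objective: simpler decomposition).

-- ===== PORT A =====
-- A's merge step: read merged[-1], either widen it in place or append the segment.
def pvMergeStep (merged : List ((Int × Int) × String)) (x : (Int × Int) × String) :
    List ((Int × Int) × String) :=
  match merged.getLast? with
  | none => merged    -- unreachable: merged is nonempty throughout A's loop
  | some last =>
    if x.1.1 ≤ last.1.2 then
      merged.dropLast ++ [((last.1.1, max last.1.2 x.1.2), last.2)]
    else merged ++ [x]

def find_fragments_and_sources (segments : List ((Int × Int) × String)) :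
    List ((Int × Int) × String) :=
  if segments = [] then []
  else
    match PySem.List.sorted2 segments (fun x => x.1.1) (fun x => x.1.2) with
    | [] => []          -- unreachable: sorted of a nonempty list is nonempty
    | s0 :: rest => rest.foldl pvMergeStep [s0]

-- A's emission step: state = (output, bibliography, pointer, idx).
def pvEmitStep (words : List String)
    (st : List String × List (Int × String) × Int × Int)
    (seg : (Int × Int) × String) :
    List String × List (Int × String) × Int × Int :=
  (st.1 ++ [PySem.Str.join " " (PySem.List.slice words (some st.2.2.1) (some seg.1.1)),
     "<font backColor='#FFF2A8'>" ++
       PySem.Str.join " " (PySem.List.slice words (some seg.1.1) (some seg.1.2)) ++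
       "</font>[" ++ PySem.Int.toStr st.2.2.2 ++ "]"],
   st.2.1 ++ [(st.2.2.2, seg.2)], seg.1.2, st.2.2.2 + 1)

def highlight_final_text (final_text : String)
    (segments_with_sources : List ((Int × Int) × String)) :
    String × (List (Int × String)) :=
  let words := PySem.Str.split₀ final_text
  let merged := find_fragments_and_sources segments_with_sources
  let st := merged.foldl (pvEmitStep words) ([], [], 0, 1)
  (PySem.Str.join " "
      (st.1 ++ [PySem.Str.join " " (PySem.List.slice words (some st.2.2.1) none)]),
   st.2.1)

-- ===== PORT B =====
-- B's flush of the current group (gs, ge, gsrc) into (output, bibliography, pointer, idx).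
def pvFlush (words : List String)
    (st : List String × List (Int × String) × Int × Int)
    (gs ge : Int) (gsrc : String) :
    List String × List (Int × String) × Int × Int :=
  (st.1 ++ [PySem.Str.join " " (PySem.List.slice words (some st.2.2.1) (some gs)),
     "<font backColor='#FFF2A8'>" ++
       PySem.Str.join " " (PySem.List.slice words (some gs) (some ge)) ++
       "</font>[" ++ PySem.Int.toStr st.2.2.2 ++ "]"],
   st.2.1 ++ [(st.2.2.2, gsrc)], ge, st.2.2.2 + 1)

-- B's loop body: extend the current group or flush it and start a new one.
def pvBStep (words : List String)
    (acc : ((Int × Int) × String) × (List String × List (Int × String) × Int × Int))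
    (seg : (Int × Int) × String) :
    ((Int × Int) × String) × (List String × List (Int × String) × Int × Int) :=
  if seg.1.1 ≤ acc.1.1.2 then (((acc.1.1.1, max acc.1.1.2 seg.1.2), acc.1.2), acc.2)
  else (seg, pvFlush words acc.2 acc.1.1.1 acc.1.1.2 acc.1.2)

def highlight_final_text_alt (final_text : String)
    (segments_with_sources : List ((Int × Int) × String)) :
    String × (List (Int × String)) :=
  let words := PySem.Str.split₀ final_text
  let st :=
    match PySem.List.sorted2 segments_with_sources (fun x => x.1.1) (fun x => x.1.2) with
    | [] => (([] : List String), ([] : List (Int × String)), (0 : Int), (1 : Int))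
    | g0 :: rest =>
      let r := rest.foldl (pvBStep words) (g0, ([], [], 0, 1))
      pvFlush words r.2 r.1.1.1 r.1.1.2 r.1.2
  (PySem.Str.join " "
      (st.1 ++ [PySem.Str.join " " (PySem.List.slice words (some st.2.2.1) none)]),
   st.2.1)

-- ===== PRECONDITION & SPEC =====
def Spec_highlight_final_text (final_text : String) (segments_with_sources : List ((Int × Int) × String)) (out : String × (List (Int × String))) : Prop := out = highlight_final_text_alt final_text segments_with_sources
instance (final_text : String) (segments_with_sources : List ((Int × Int) × String)) (out : String × (List (Int × String))) : Decidable (Spec_highlight_final_text final_text segments_with_sources out) := by unfold Spec_highlight_final_text; infer_instance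

-- ===== CLAIM (what is proved, stated in full; the proofs are below) =====
def Claim_equal_highlight_final_text : Prop := ∀ (final_text : String) (segments_with_sources : List ((Int × Int) × String)), Dom_highlight_final_text final_text segments_with_sources → Spec_highlight_final_text final_text segments_with_sources (highlight_final_text final_text segments_with_sources)

-- ===== LEMMAS AND PROOFS =====

-- Pair form of A's merge loop: the accumulator is (finished groups, current last group).
def pvPStep (ac : List ((Int × Int) × String) × ((Int × Int) × String))
    (x : (Int × Int) × String) :
    List ((Int × Int) × String) × ((Int × Int) × String) :=
  if x.1.1 ≤ ac.2.1.2 then (ac.1, ((ac.2.1.1, max ac.2.1.2 x.1.2), ac.2.2))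
  else (ac.1 ++ [ac.2], x)

theorem pvMerge_pair (rest : List ((Int × Int) × String))
    (acc : List ((Int × Int) × String)) (cur : (Int × Int) × String) :
    rest.foldl pvMergeStep (acc ++ [cur]) =
      (rest.foldl pvPStep (acc, cur)).1 ++ [(rest.foldl pvPStep (acc, cur)).2] := by
  induction rest generalizing acc cur with
  | nil => simp
  | cons x t ih =>
    simp only [List.foldl_cons]
    have hstep : pvMergeStep (acc ++ [cur]) x =
        (pvPStep (acc, cur) x).1 ++ [(pvPStep (acc, cur) x).2] := by
      simp only [pvMergeStep, pvPStep, List.getLast?_concat, List.dropLast_concat]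
      split_ifs <;> simp
    rw [hstep]
    rcases h : pvPStep (acc, cur) x with ⟨a', c'⟩
    exact ih a' c'

theorem pvPStep_accfree (rest : List ((Int × Int) × String))
    (acc : List ((Int × Int) × String)) (cur : (Int × Int) × String) :
    rest.foldl pvPStep (acc, cur) =
      (acc ++ (rest.foldl pvPStep ([], cur)).1, (rest.foldl pvPStep ([], cur)).2) := by
  induction rest generalizing acc cur with
  | nil => simp
  | cons x t ih =>
    simp only [List.foldl_cons, pvPStep]
    split_ifs with h
    · exact ih acc _
    · simp only [List.nil_append]
      rw [ih (acc ++ [cur]) x, ih [cur] x]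
      simp

theorem pvEmit_eq_flush (words : List String)
    (st : List String × List (Int × String) × Int × Int)
    (seg : (Int × Int) × String) :
    pvEmitStep words st seg = pvFlush words st seg.1.1 seg.1.2 seg.2 := rfl

theorem pvFusion (words : List String) (rest : List ((Int × Int) × String))
    (cur : (Int × Int) × String)
    (st : List String × List (Int × String) × Int × Int) :
    ((rest.foldl pvPStep ([], cur)).1 ++ [(rest.foldl pvPStep ([], cur)).2]).foldl
        (pvEmitStep words) st =
      (fun r => pvFlush words r.2 r.1.1.1 r.1.1.2 r.1.2)
        (rest.foldl (pvBStep words) (cur, st)) := by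
  induction rest generalizing cur st with
  | nil =>
    simp [pvEmit_eq_flush]
  | cons x t ih =>
    simp only [List.foldl_cons, pvPStep, pvBStep]
    split_ifs with h
    · exact ih _ st
    · simp only [List.nil_append]
      rw [pvPStep_accfree t [cur] x]
      have := ih x (pvFlush words st cur.1.1 cur.1.2 cur.2)
      simpa [List.foldl_append, pvEmit_eq_flush] using this

theorem pvSorted2_nil_iff (segs : List ((Int × Int) × String)) :
    PySem.List.sorted2 segs (fun x => x.1.1) (fun x => x.1.2) = [] ↔ segs = [] := by
  constructor
  · intro h
    have hp := PySem.List.sorted2_perm segs (fun x => x.1.1) (fun x => x.1.2) (rev := false)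
    rw [h] at hp
    exact hp.symm.eq_nil
  · intro h; subst h; rfl

-- ===== VERDICT (by name: the statement is the Claim_ definition above) =====
theorem highlight_final_text_spec : Claim_equal_highlight_final_text := by
  intro ft segs _
  unfold Spec_highlight_final_text highlight_final_text highlight_final_text_alt
    find_fragments_and_sources
  rcases h : PySem.List.sorted2 segs (fun x => x.1.1) (fun x => x.1.2) with _ | ⟨g0, rest⟩
  · have hnil : segs = [] := (pvSorted2_nil_iff segs).mp h
    simp [hnil]
  · have hne : ¬ segs = [] := by
      intro hx
      rw [(pvSorted2_nil_iff segs).mpr hx] at h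
      simp at h
    simp only [hne, if_false]
    rw [show [g0] = [] ++ [g0] from rfl, pvMerge_pair rest [] g0,
      pvFusion (PySem.Str.split₀ ft) rest g0 ([], [], 0, 1)]
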